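-- pv_equiv track=rewrite | github.com/daniel4828/AnkiAdvanced | database/cards.py | _interleave_cards
-- ===== SOURCE A (Python) =====
-- def _interleave_cards(base: list, inserts: list) -> list:
--     """Distribute inserts evenly throughout base."""
--     if not inserts:
--         return base
--     if not base:
--         return inserts
--     result = list(base)
--     step = max(1, len(base) // (len(inserts) + 1))
--     for i, card in enumerate(inserts):
--         pos = min(step * (i + 1) + i, len(result))
--         result.insert(pos, card)
--     return result
-- ===== SOURCE B (Python) =====
-- def _interleave_cards(base: list, inserts: list) -> list:
--     """Distribute inserts evenly throughout base (single-pass merge)."""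
--     if not inserts:
--         return base
--     if not base:
--         return inserts
--     n = len(base)
--     step = max(1, n // (len(inserts) + 1))
--     out = []
--     j = 0
--     for i, card in enumerate(inserts):
--         q = min(step * (i + 1), n)
--         out.extend(base[j:q])
--         j = q
--         out.append(card)
--     out.extend(base[j:])
--     return out
-- ===== Notes on version B (the rewrite author's own statement) =====
-- stated objective: faster
-- what changed: Replaced the repeated list.insert into a growing result (each insert shifts a tail) by a single left-to-right merge that computes each card's base-relative position min(step*(i+1), len(base)) and emits base segments and cards in order.
import Mathlib
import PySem

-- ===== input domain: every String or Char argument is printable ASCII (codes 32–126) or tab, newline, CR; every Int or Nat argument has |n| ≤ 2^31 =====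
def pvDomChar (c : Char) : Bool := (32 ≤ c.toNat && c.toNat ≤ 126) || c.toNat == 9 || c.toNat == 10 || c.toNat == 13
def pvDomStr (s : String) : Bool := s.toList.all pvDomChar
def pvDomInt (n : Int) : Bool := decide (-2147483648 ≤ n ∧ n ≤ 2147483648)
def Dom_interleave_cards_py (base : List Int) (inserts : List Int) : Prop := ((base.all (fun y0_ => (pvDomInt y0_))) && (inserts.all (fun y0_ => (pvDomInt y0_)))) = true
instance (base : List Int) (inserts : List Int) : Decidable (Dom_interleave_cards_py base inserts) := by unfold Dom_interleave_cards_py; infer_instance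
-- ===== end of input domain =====

-- B replaces A's repeated list.insert into a growing result by a single in-order merge
-- using base-relative positions; the return values are proved equal on all inputs.

-- ===== PORT A =====
-- A's loop body: result.insert(min(step*(i+1)+i, len(result)), card)
def pvAStep (step : Int) (result : List Int) (p : Int × Int) : List Int :=
  PySem.List.insert result (min (step * (p.1 + 1) + p.1) (result.length : Int)) p.2

def interleave_cards_py (base : List Int) (inserts : List Int) : List Int :=
  if inserts = [] then base
  else if base = [] then inserts
  else
    -- step = max(1, len(base) // (len(inserts)+1)), inlined into the fold over enumerate(inserts)
    (PySem.List.enumerate inserts).foldl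
      (pvAStep (max 1 (PySem.Int.floordiv (base.length : Int) ((inserts.length : Int) + 1)))) base

-- ===== PORT B =====
-- Source B's loop: i is the enumerate counter, j the number of base elements already emitted;
-- each step emits base[j:q] (= (base.drop j).take (q-j), exact since 0 ≤ j ≤ q ≤ len base) then the card.
def pvBLoop (base : List Int) (s n : Nat) : Nat → Nat → List Int → List Int
  | _, j, [] => base.drop j
  | i, j, c :: cs =>
      let q := min (s * (i + 1)) n
      (base.drop j).take (q - j) ++ c :: pvBLoop base s n (i + 1) q cs

def interleave_cards_py_alt (base : List Int) (inserts : List Int) : List Int :=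
  if inserts = [] then base
  else if base = [] then inserts
  else
    -- s = max(1, n // (m+1)); Python '//' on nonnegative ints = Nat division
    pvBLoop base (max 1 (base.length / (inserts.length + 1))) base.length 0 0 inserts

-- ===== PRECONDITION & SPEC =====
def Spec_interleave_cards_py (base : List Int) (inserts : List Int) (out : List Int) : Prop := out = interleave_cards_py_alt base inserts
instance (base : List Int) (inserts : List Int) (out : List Int) : Decidable (Spec_interleave_cards_py base inserts out) := by unfold Spec_interleave_cards_py; infer_instance

-- ===== CLAIM (what is proved, stated in full; the proofs are below) =====
def Claim_equal_interleave_cards_py : Prop := ∀ (base : List Int) (inserts : List Int), Dom_interleave_cards_py base inserts → Spec_interleave_cards_py base inserts (interleave_cards_py base inserts)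

-- ===== LEMMAS AND PROOFS =====

-- length of the merge: n - j + (number of cards still to place), provided j ≤ q_i
theorem pvBLoop_length (base : List Int) (s : Nat) :
    ∀ (cs : List Int) (i j : Nat), j ≤ min (s * (i + 1)) base.length →
      (pvBLoop base s base.length i j cs).length = base.length - j + cs.length := by
  intro cs
  induction cs with
  | nil => intro i j h; simp [pvBLoop]
  | cons c cs ih =>
      intro i j h
      have hq : min (s * (i + 1)) base.length ≤ min (s * (i + 1 + 1)) base.length := by
        have : s * (i + 1) ≤ s * (i + 1 + 1) := Nat.mul_le_mul_left _ (by omega)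
        omega
      simp only [pvBLoop, List.length_append, List.length_cons, List.length_take,
        List.length_drop]
      rw [ih (i + 1) (min (s * (i + 1)) base.length) hq]
      omega

-- inserting the next card at relative position q_k + |cs| - j turns the merge of cs
-- into the merge of cs ++ [c]  (q_k = min (s*(i+|cs|+1)) n is the card's base position)
theorem pvBLoop_insert (base : List Int) (s : Nat) :
    ∀ (cs : List Int) (i j : Nat) (c : Int), j ≤ min (s * (i + 1)) base.length →
      pvBLoop base s base.length i j (cs ++ [c]) =
        (pvBLoop base s base.length i j cs).take
            (min (s * (i + cs.length + 1)) base.length + cs.length - j)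
          ++ c :: (pvBLoop base s base.length i j cs).drop
            (min (s * (i + cs.length + 1)) base.length + cs.length - j) := by
  intro cs
  induction cs with
  | nil =>
      intro i j c h
      simp only [List.nil_append, pvBLoop, List.length_nil, Nat.add_zero]
      have hd : j + (min (s * (i + 1)) base.length - j) = min (s * (i + 1)) base.length := by omega
      rw [List.drop_drop, hd]
  | cons c' cs ih =>
      intro i j c h
      have hq : min (s * (i + 1)) base.length ≤ min (s * (i + 1 + 1)) base.length := by
        have : s * (i + 1) ≤ s * (i + 1 + 1) := Nat.mul_le_mul_left _ (by omega)
        omega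
      simp only [List.cons_append, pvBLoop, List.length_cons]
      rw [ih (i + 1) (min (s * (i + 1)) base.length) c hq]
      have hseg : ((base.drop j).take (min (s * (i + 1)) base.length - j)).length =
          min (s * (i + 1)) base.length - j := by
        simp only [List.length_take, List.length_drop]
        omega
      have hqk : min (s * (i + 1)) base.length ≤
          min (s * (i + (cs.length + 1) + 1)) base.length := by
        have : s * (i + 1) ≤ s * (i + (cs.length + 1) + 1) := Nat.mul_le_mul_left _ (by omega)
        omega
      have hidx : i + 1 + cs.length + 1 = i + (cs.length + 1) + 1 := by omega
      rw [hidx]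
      have hpos : min (s * (i + (cs.length + 1) + 1)) base.length + (cs.length + 1) - j =
          ((base.drop j).take (min (s * (i + 1)) base.length - j)).length +
            (min (s * (i + (cs.length + 1) + 1)) base.length + cs.length
              - min (s * (i + 1)) base.length + 1) := by
        rw [hseg]; omega
      rw [hpos, List.take_length_add_append, List.drop_length_add_append,
        List.take_succ_cons, List.drop_succ_cons]
      simp [List.append_assoc]

-- A's fold over enumerate equals B's merge, for any (shared) step value s
theorem pvFold_eq (base : List Int) (s : Nat) :
    ∀ (cs : List Int),
      (PySem.List.enumerate cs).foldl (pvAStep (s : Int)) base =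
        pvBLoop base s base.length 0 0 cs := by
  intro cs
  induction cs using List.reverseRecOn with
  | nil => simp [PySem.List.enumerate_nil, pvBLoop]
  | append_singleton cs c ih =>
      rw [PySem.List.enumerate_append]
      simp only [PySem.List.enumerate_cons, PySem.List.enumerate_nil, List.foldl_append,
        List.foldl_cons, List.foldl_nil, ih]
      set R := pvBLoop base s base.length 0 0 cs with hR
      have hlen : R.length = base.length + cs.length := by
        rw [hR, pvBLoop_length base s cs 0 0 (Nat.zero_le _)]
        omega
      unfold pvAStep
      have hq : min (s * (cs.length + 1)) base.length + cs.length ≤ R.length := by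
        rw [hlen]; omega
      have hpos : min ((s : Int) * ((0 + (cs.length : Int)) + 1) + (0 + (cs.length : Int)))
            (R.length : Int)
          = ((min (s * (cs.length + 1)) base.length + cs.length : Nat) : Int) := by
        rw [hlen]
        push_cast
        simp only [zero_add]
        generalize (s : Int) * ((cs.length : Int) + 1) = t
        omega
      rw [hpos, PySem.List.insert_natCast R _ c hq, hR,
        pvBLoop_insert base s cs 0 0 c (Nat.zero_le _)]
      have h0 : 0 + cs.length + 1 = cs.length + 1 := by omega
      rw [h0]
      simp

-- ===== VERDICT (by name: the statement is the Claim_ definition above) =====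
theorem interleave_cards_py_spec : Claim_equal_interleave_cards_py := by
  intro base inserts _
  unfold Spec_interleave_cards_py interleave_cards_py interleave_cards_py_alt
  by_cases h1 : inserts = []
  · simp [h1]
  · by_cases h2 : base = []
    · simp [h1, h2]
    · rw [if_neg h1, if_neg h1, if_neg h2, if_neg h2]
      have e1 : ((inserts.length : Int) + 1) = ((inserts.length + 1 : Nat) : Int) := by
        push_cast; ring
      have hstep : max 1 (PySem.Int.floordiv (base.length : Int) ((inserts.length : Int) + 1))
          = ((max 1 (base.length / (inserts.length + 1)) : Nat) : Int) := by
        rw [e1, PySem.Int.floordiv_natCast]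
        push_cast
        omega
      rw [hstep]
      exact pvFold_eq base (max 1 (base.length / (inserts.length + 1))) inserts
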